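-- pv_equiv track=rewrite | github.com/EdAyers/sss | uxu/uxu/listdiff.py | deduplicate_values
-- ===== SOURCE A (Python) =====
-- from collections import Counter, defaultdict
--
-- def deduplicate_values(d: dict):
--     acc = {}
--     c = Counter()
--     for k, v in d.items():
--         n = c[v]
--         acc[k] = f"{v}-{n}"
--         c[v] += 1
--     return acc
-- ===== SOURCE B (Python) =====
-- from collections import defaultdict
--
-- def deduplicate_values(d: dict):
--     groups = defaultdict(list)
--     for k, v in d.items():
--         groups[v].append(k)
--     suffix = {k: i for keys in groups.values() for i, k in enumerate(keys)}
--     return {k: f"{v}-{suffix[k]}" for k, v in d.items()}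
-- ===== Notes on version B (the rewrite author's own statement) =====
-- stated objective: alternative
-- what changed: A's single stateful scan with a running Counter is replaced by a three-stage group-then-enumerate pipeline: first group keys by value into a defaultdict, then build a suffix-index table by enumerating each value's key list, then emit each key's value tagged with its table entry. Pre_ excludes association lists with duplicate keys, which do not represent any Python dict input.
import Mathlib
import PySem

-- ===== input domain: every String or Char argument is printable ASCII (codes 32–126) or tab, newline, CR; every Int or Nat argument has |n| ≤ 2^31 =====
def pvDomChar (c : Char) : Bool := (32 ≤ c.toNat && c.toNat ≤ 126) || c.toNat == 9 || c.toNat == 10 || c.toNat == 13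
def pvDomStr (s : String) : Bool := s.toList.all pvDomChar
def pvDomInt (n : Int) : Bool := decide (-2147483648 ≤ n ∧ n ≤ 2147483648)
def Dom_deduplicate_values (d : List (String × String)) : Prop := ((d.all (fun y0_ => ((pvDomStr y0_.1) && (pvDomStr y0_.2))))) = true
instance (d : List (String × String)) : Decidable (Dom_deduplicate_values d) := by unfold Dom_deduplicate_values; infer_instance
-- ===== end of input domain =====

-- B replaces A's running-Counter scan by a group-then-enumerate pipeline: group keys by
-- value, enumerate each group into a suffix-index table, then emit the tagged values
-- (alternative decomposition, same cost).


-- ===== PORT A =====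
def deduplicate_values (d : List (String × String)) : List (String × String) :=
  ((d.foldl
      (fun (st : PySem.Dict String String × PySem.Dict String Int) kv =>
        let n := st.2.getD kv.2 0
        (st.1.insert kv.1 (kv.2 ++ "-" ++ PySem.Int.toStr n), st.2.insert kv.2 (n + 1)))
      (PySem.Dict.empty, PySem.Dict.empty)).1).items

-- ===== PORT B =====
def deduplicate_values_alt (d : List (String × String)) : List (String × String) :=
  -- pass 1: groups = defaultdict(list); for k, v in d.items(): groups[v].append(k)
  let groups : PySem.Dict String (List String) :=
    d.foldl (fun g kv => g.modify kv.2 [] (· ++ [kv.1])) PySem.Dict.empty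
  -- pass 2: suffix = {k: i for keys in groups.values() for i, k in enumerate(keys)}
  let suffix : PySem.Dict String Int :=
    groups.values.foldl
      (fun s keys => (PySem.List.enumerate keys).foldl (fun s q => s.insert q.2 q.1) s)
      PySem.Dict.empty
  -- pass 3: {k: f"{v}-{suffix[k]}" for k, v in d.items()}
  -- suffix[k] ported as getD _ 0: exact here, since every key of d is inserted into suffix
  (d.foldl
      (fun (acc : PySem.Dict String String) kv =>
        acc.insert kv.1 (kv.2 ++ "-" ++ PySem.Int.toStr (suffix.getD kv.1 0)))
      PySem.Dict.empty).items

-- ===== PRECONDITION & SPEC =====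
-- Pre_ excludes association lists with duplicate keys: they do not represent a Python dict
-- (the dict collapses them before either function ever runs), so the ports' behaviour there
-- corresponds to no Python input.
def Pre_deduplicate_values (d : List (String × String)) : Prop := (d.map Prod.fst).Nodup
instance (d : List (String × String)) : Decidable (Pre_deduplicate_values d) := by
  unfold Pre_deduplicate_values; infer_instance

def pvWitness_deduplicate_values : (List (String × String)) := [("a", "x"), ("b", "x"), ("c", "y")]

def Spec_deduplicate_values (d : List (String × String)) (out : List (String × String)) : Prop := out = deduplicate_values_alt d
instance (d : List (String × String)) (out : List (String × String)) : Decidable (Spec_deduplicate_values d out) := by unfold Spec_deduplicate_values; infer_instance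

-- ===== CLAIM (what is proved, stated in full; the proofs are below) =====
def Claim_equal_deduplicate_values : Prop := ∀ (d : List (String × String)), Dom_deduplicate_values d → Pre_deduplicate_values d → Spec_deduplicate_values d (deduplicate_values d)

-- ===== LEMMAS AND PROOFS =====

-- Normal form of A's result: each entry's value suffixed with the count of that value among
-- the values already seen.
def pvMkL (seen : List String) : List (String × String) → List (String × String)
  | [] => []
  | (k, v) :: l =>
      (k, v ++ "-" ++ PySem.Int.toStr (List.count v seen : Int)) :: pvMkL (seen ++ [v]) l

theorem pvMkL_map_fst (l : List (String × String)) :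
    ∀ seen, (pvMkL seen l).map Prod.fst = l.map Prod.fst := by
  induction l with
  | nil => intro seen; simp [pvMkL]
  | cons kv l ih =>
      intro seen
      obtain ⟨k, v⟩ := kv
      simp [pvMkL, ih]

theorem pvMkL_length (l : List (String × String)) (seen : List String) :
    (pvMkL seen l).length = l.length := by
  have := pvMkL_map_fst l seen
  calc (pvMkL seen l).length = ((pvMkL seen l).map Prod.fst).length := by simp
    _ = l.length := by rw [this]; simp

theorem pvMkL_getElem (l : List (String × String)) :
    ∀ (seen : List String) (i : Nat) (hi : i < l.length),
      (pvMkL seen l)[i]'(by rw [pvMkL_length]; exact hi)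
        = (l[i].1, l[i].2 ++ "-" ++
            PySem.Int.toStr ((List.count l[i].2 (seen ++ (l.take i).map Prod.snd) : Nat) : Int)) := by
  induction l with
  | nil => intro seen i hi; simp at hi
  | cons kv l ih =>
      intro seen i hi
      obtain ⟨k, v⟩ := kv
      cases i with
      | zero => simp [pvMkL]
      | succ i =>
          have hi' : i < l.length := by simpa using hi
          have := ih (seen ++ [v]) i hi'
          simp only [pvMkL, List.getElem_cons_succ, List.take_succ_cons, List.map_cons]
          rw [this]
          simp [List.append_assoc]

-- A's loop computes pvMkL (as a fold of inserts), for any counter agreeing with `seen`.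
theorem pvA_loop (l : List (String × String)) :
    ∀ (acc : PySem.Dict String String) (c : PySem.Dict String Int) (seen : List String),
      (∀ v, c.getD v 0 = (List.count v seen : Int)) →
      (l.foldl
          (fun (st : PySem.Dict String String × PySem.Dict String Int) kv =>
            let n := st.2.getD kv.2 0
            (st.1.insert kv.1 (kv.2 ++ "-" ++ PySem.Int.toStr n), st.2.insert kv.2 (n + 1)))
          (acc, c)).1
        = (pvMkL seen l).foldl (fun a p => a.insert p.1 p.2) acc := by
  induction l with
  | nil => intro acc c seen _; simp [pvMkL]
  | cons kv l ih =>
      intro acc c seen hc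
      obtain ⟨k, v⟩ := kv
      simp only [List.foldl_cons, pvMkL]
      rw [hc v]
      refine ih _ _ (seen ++ [v]) ?_
      intro w
      rw [PySem.Dict.getD_insert]
      by_cases hw : w = v
      · subst hw; rw [hc]; simp
      · simp [hw, hc w, List.count_append, (Ne.symm hw)]

-- a fold of inserts over fresh distinct keys is a map (A side)
theorem pvA_items (d : List (String × String)) (h : (d.map Prod.fst).Nodup) :
    deduplicate_values d = pvMkL [] d := by
  unfold deduplicate_values
  rw [pvA_loop d PySem.Dict.empty PySem.Dict.empty [] (by intro v; simp)]
  rw [PySem.Dict.items_foldl_insert_fresh (pvMkL [] d) Prod.fst Prod.snd PySem.Dict.empty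
        (by intro a _; simp) (by rw [pvMkL_map_fst]; exact h)]
  have he : (PySem.Dict.empty : PySem.Dict String String).items = [] := rfl
  simp [he]

-- ---------- B side ----------

-- the key-list of value v in B's groups table
def pvGrp (d : List (String × String)) (v : String) : List String :=
  (d.filter (fun kv => kv.2 == v)).map Prod.fst

theorem pvGroups_getD (d : List (String × String)) (v : String) :
    (d.foldl (fun (g : PySem.Dict String (List String)) kv =>
        g.modify kv.2 [] (· ++ [kv.1])) PySem.Dict.empty).getD v []
      = pvGrp d v := by
  have h : d.foldl (fun (g : PySem.Dict String (List String)) kv =>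
        g.modify kv.2 [] (· ++ [kv.1])) PySem.Dict.empty
      = (d.map Prod.swap).foldl (fun (g : PySem.Dict String (List String)) p =>
        g.modify p.1 [] (· ++ [p.2])) PySem.Dict.empty := by
    rw [List.foldl_map]; rfl
  rw [h, PySem.Dict.getD_foldl_modify_append]
  simp [pvGrp, List.filter_map, List.map_map, Function.comp_def, Prod.swap]

theorem pvGroups_keys (d : List (String × String)) :
    (d.foldl (fun (g : PySem.Dict String (List String)) kv =>
        g.modify kv.2 [] (· ++ [kv.1])) PySem.Dict.empty).keys
      = PySem.Set.ofList (d.map Prod.snd) := by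
  rw [PySem.Dict.keys_foldl_modify_key d (fun kv => kv.2)]
  simp [PySem.Set.update_nil_left, PySem.Dict.keys_empty]

-- inner fold of B's suffix comprehension: enumerate one key list
theorem pvInner (keys : List String) (hnd : keys.Nodup) :
    ∀ (n : Int) (s : PySem.Dict String Int) (k : String),
      ((PySem.List.enumerate keys n).foldl (fun s q => s.insert q.2 q.1) s).getD k 0
        = if k ∈ keys then n + (keys.idxOf k : Int) else s.getD k 0 := by
  induction keys with
  | nil => intro n s k; simp [PySem.List.enumerate_nil]
  | cons x t ih =>
      intro n s k
      have hx : x ∉ t := (List.nodup_cons.mp hnd).1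
      have hndt : t.Nodup := (List.nodup_cons.mp hnd).2
      rw [PySem.List.enumerate_cons]
      simp only [List.foldl_cons]
      rw [ih hndt (n + 1) (s.insert x n) k]
      by_cases hk : k = x
      · subst hk
        simp [hx, List.idxOf_cons_self]
      · by_cases hkt : k ∈ t
        · simp [hkt, hk, Ne.symm hk]
          ring
        · simp [hkt, hk, PySem.Dict.getD_insert]

-- an insert fold never touches a key absent from its pair list
theorem pvInnerSkip (E : List (Int × String)) (k : String) :
    ∀ s : PySem.Dict String Int, k ∉ E.map (·.2) →
      (E.foldl (fun s q => s.insert q.2 q.1) s).getD k 0 = s.getD k 0 := by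
  induction E with
  | nil => intro s _; rfl
  | cons q t ih =>
      intro s h
      simp only [List.map_cons, List.mem_cons, not_or] at h
      simp only [List.foldl_cons]
      rw [ih _ h.2, PySem.Dict.getD_insert]
      simp [h.1]

-- the outer fold skips lists not containing k
theorem pvOuterSkip (L : List (List String)) (k : String) (h : ∀ l ∈ L, k ∉ l) :
    ∀ s : PySem.Dict String Int,
      (L.foldl (fun s keys =>
          (PySem.List.enumerate keys).foldl (fun s q => s.insert q.2 q.1) s) s).getD k 0
        = s.getD k 0 := by
  induction L with
  | nil => intro s; rfl
  | cons l t ih =>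
      intro s
      simp only [List.foldl_cons]
      rw [ih (fun l' hl' => h l' (List.mem_cons_of_mem _ hl'))]
      exact pvInnerSkip _ k s (by
        rw [show (PySem.List.enumerate l).map (·.2) = l from PySem.List.map_snd_enumerate l 0]
        exact h l List.mem_cons_self)

-- value of B's suffix table at a key appearing in exactly one group list
theorem pvOuterHit (L1 L2 : List (List String)) (keys : List String) (k : String)
    (hnd : keys.Nodup) (hk : k ∈ keys) (h2 : ∀ l ∈ L2, k ∉ l) (s : PySem.Dict String Int) :
    ((L1 ++ keys :: L2).foldl (fun s keys =>
        (PySem.List.enumerate keys).foldl (fun s q => s.insert q.2 q.1) s) s).getD k 0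
      = (keys.idxOf k : Int) := by
  rw [List.foldl_append, List.foldl_cons]
  rw [pvOuterSkip L2 k h2]
  rw [pvInner keys hnd 0 _ k]
  simp [hk]

theorem pvIdxOf_append (l : List String) (k : String) (h : k ∉ l) (l2 : List String) :
    (l ++ k :: l2).idxOf k = l.length := by
  induction l with
  | nil => simp
  | cons x t ih =>
      simp at h
      simp [Ne.symm h.1, ih h.2]

theorem pvCount_snd (l : List (String × String)) (v : String) :
    ((l.map Prod.snd).count v) = (l.filter (fun kv => kv.2 == v)).length := by
  induction l with
  | nil => rfl
  | cons kv t ih => by_cases h : kv.2 = v <;> simp [h, ih]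

-- main per-index lemma: B's suffix table at d[i].1 is the prefix count of d[i].2
theorem pvSuffix_getD (d : List (String × String)) (hnd : (d.map Prod.fst).Nodup)
    (i : Nat) (hi : i < d.length) :
    ((((d.foldl (fun (g : PySem.Dict String (List String)) kv =>
          g.modify kv.2 [] (· ++ [kv.1])) PySem.Dict.empty).values).foldl
        (fun s keys => (PySem.List.enumerate keys).foldl (fun s q => s.insert q.2 q.1) s)
        PySem.Dict.empty).getD (d[i].1) 0)
      = ((((d.take i).map Prod.snd).count d[i].2 : Nat) : Int) := by
  set G := d.foldl (fun (g : PySem.Dict String (List String)) kv =>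
      g.modify kv.2 [] (· ++ [kv.1])) PySem.Dict.empty with hG
  obtain ⟨k, v, hkv⟩ : ∃ k v, d[i] = (k, v) := ⟨d[i].1, d[i].2, rfl⟩
  rw [hkv]
  have hmemd : (k, v) ∈ d := hkv ▸ List.getElem_mem hi
  have hd : d = d.take i ++ (k, v) :: d.drop (i+1) := by
    conv_lhs => rw [← List.take_append_drop i d]
    rw [List.drop_eq_getElem_cons hi, hkv]
  have hkeys : G.keys = PySem.Set.ofList (d.map Prod.snd) := pvGroups_keys d
  have hknd : G.keys.Nodup := by rw [hkeys]; exact PySem.Set.nodup_ofList _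
  have hvmem : v ∈ G.keys := by
    rw [hkeys, PySem.Set.mem_ofList]
    exact List.mem_map_of_mem hmemd
  have hvals : G.values = G.keys.map (fun w => pvGrp d w) := by
    rw [PySem.Dict.values_eq_map_keys G hknd []]
    exact List.map_congr_left (fun w _ => pvGroups_getD d w)
  obtain ⟨K1, K2, hsplit⟩ := List.append_of_mem hvmem
  have hK2 : ∀ w ∈ K2, w ≠ v := by
    intro w hw hwv
    have h' := hknd
    rw [hsplit] at h'
    exact (List.nodup_cons.mp (List.nodup_append.mp h').2.1).1 (hwv ▸ hw)
  have huniq : ∀ p ∈ d, p.1 = k → p = (k, v) := by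
    intro p hp hpk
    have := List.inj_on_of_nodup_map hnd hp hmemd hpk
    rw [this]
  have hkgrp : k ∈ pvGrp d v := by
    refine List.mem_map.mpr ⟨(k, v), ?_, rfl⟩
    exact List.mem_filter.mpr ⟨hmemd, by simp⟩
  have hgrpnd : (pvGrp d v).Nodup :=
    hnd.sublist (List.Sublist.map Prod.fst
      (List.filter_sublist : (d.filter (fun kv => kv.2 == v)).Sublist d))
  have hvals' : G.values
      = K1.map (fun w => pvGrp d w) ++ pvGrp d v :: K2.map (fun w => pvGrp d w) := by
    rw [hvals, hsplit]; simp
  have h2 : ∀ l ∈ K2.map (fun w => pvGrp d w), k ∉ l := by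
    intro l hl
    obtain ⟨w, hw, rfl⟩ := List.mem_map.mp hl
    intro hkw
    obtain ⟨p, hp, hpk⟩ := List.mem_map.mp hkw
    have hpd := (List.mem_filter.mp hp).1
    have hpv := (List.mem_filter.mp hp).2
    have hpi := huniq p hpd hpk
    rw [hpi] at hpv
    exact hK2 w hw (beq_iff_eq.mp hpv).symm
  rw [hvals', pvOuterHit _ _ _ _ hgrpnd hkgrp h2 _]
  -- now compute idxOf k (pvGrp d v)
  have hgrpsplit : pvGrp d v
      = pvGrp (d.take i) v ++ k :: pvGrp (d.drop (i+1)) v := by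
    unfold pvGrp
    conv_lhs => rw [hd]
    simp [List.filter_append]
  have hsplitf : d.map Prod.fst
      = (d.take i).map Prod.fst ++ k :: (d.drop (i+1)).map Prod.fst := by
    conv_lhs => rw [hd]
    simp
  have hkfst : k ∉ (d.take i).map Prod.fst := by
    have h' := hnd
    rw [hsplitf, List.nodup_append] at h'
    intro hk
    exact h'.2.2 k hk k List.mem_cons_self rfl
  have hknotin : k ∉ pvGrp (d.take i) v := by
    intro hk
    obtain ⟨p, hp, hpk⟩ := List.mem_map.mp hk
    exact hkfst (hpk ▸ List.mem_map_of_mem (List.mem_filter.mp hp).1)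
  rw [hgrpsplit, pvIdxOf_append _ _ hknotin]
  rw [pvCount_snd]
  simp [pvGrp]

-- B side: the final comprehension's inserts hit fresh distinct keys too
theorem pvB_items (d : List (String × String)) (h : (d.map Prod.fst).Nodup) :
    deduplicate_values_alt d
      = d.map (fun kv => (kv.1, kv.2 ++ "-" ++
          PySem.Int.toStr
            (((((d.foldl (fun (g : PySem.Dict String (List String)) kv =>
                  g.modify kv.2 [] (· ++ [kv.1])) PySem.Dict.empty).values).foldl
                (fun s keys => (PySem.List.enumerate keys).foldl (fun s q => s.insert q.2 q.1) s)
                PySem.Dict.empty).getD kv.1 0)))) := by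
  unfold deduplicate_values_alt
  rw [PySem.Dict.items_foldl_insert_fresh d Prod.fst _ PySem.Dict.empty
        (by intro a _; simp) h]
  have he : (PySem.Dict.empty : PySem.Dict String String).items = [] := rfl
  simp [he]

-- ===== VERDICT (by name: the statement is the Claim_ definition above) =====
theorem deduplicate_values_spec : Claim_equal_deduplicate_values := by
  intro d _ hpre
  unfold Spec_deduplicate_values
  rw [pvA_items d hpre, pvB_items d hpre]
  apply List.ext_getElem
  · rw [pvMkL_length]; simp
  · intro i hi1 hi2
    have hid : i < d.length := by simpa using hi2
    rw [pvMkL_getElem d [] i hid]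
    rw [List.getElem_map]
    rw [pvSuffix_getD d hpre i hid]
    simp
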